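-- pv_equiv track=rewrite | github.com/neochen2701/TQCPans | 練習題組/挑戰題答案檔/CSF-002.py | bus_seating
-- ===== SOURCE A (Python) =====
-- def bus_seating(n, stations):
--     bus = []
--
--     for id, station in enumerate(stations):
--         cor_id = id + 1
--         for _ in range(station[1]):
--             if len(bus) > 0:
--                 bus.pop()
--
--         for _ in range(station[0]):
--             if len(bus) < 10:
--                 bus.append(cor_id)
--
--     return bus
-- ===== SOURCE B (Python) =====
-- def bus_seating(n, stations):
--     bus = []
--     for i, station in enumerate(stations, 1):
--         off = min(max(station[1], 0), len(bus))
--         bus = bus[:len(bus) - off]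
--         add = min(max(station[0], 0), 10 - len(bus))
--         bus.extend([i] * add)
--     return bus
-- ===== Notes on version B (the rewrite author's own statement) =====
-- stated objective: faster
-- what changed: Instead of simulating each passenger individually (one loop iteration per alighting/boarding person), B computes per station the clamped number of pops and appends arithmetically and applies them with one slice and one extend.
import Mathlib
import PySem

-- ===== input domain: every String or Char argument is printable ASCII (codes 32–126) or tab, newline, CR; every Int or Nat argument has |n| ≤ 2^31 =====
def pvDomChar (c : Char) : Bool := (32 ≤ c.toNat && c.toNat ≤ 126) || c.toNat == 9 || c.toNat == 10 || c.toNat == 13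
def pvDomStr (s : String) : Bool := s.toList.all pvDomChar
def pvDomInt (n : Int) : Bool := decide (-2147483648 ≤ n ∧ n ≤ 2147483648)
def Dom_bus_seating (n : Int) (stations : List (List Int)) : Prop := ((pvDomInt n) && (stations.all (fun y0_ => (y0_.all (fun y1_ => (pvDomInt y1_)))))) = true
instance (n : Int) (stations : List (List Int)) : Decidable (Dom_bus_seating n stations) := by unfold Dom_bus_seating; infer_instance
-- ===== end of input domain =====

-- B replaces A's per-passenger simulation loops by one clamped slice + extend per station (asymptotically faster).

-- ===== PORT A =====
-- one station of A: pop per-person loop, then append per-person loop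
def busStepA (bus : List Int) (p : Int × List Int) : List Int :=
  let cor_id := p.1 + 1
  let bus1 := (PySem.List.pyRange 0 (PySem.List.pyGetD p.2 1 0) 1).foldl
      (fun b _ => if 0 < b.length then b.dropLast else b) bus
  (PySem.List.pyRange 0 (PySem.List.pyGetD p.2 0 0) 1).foldl
      (fun b _ => if b.length < 10 then b ++ [cor_id] else b) bus1

def bus_seating (n : Int) (stations : List (List Int)) : List Int :=
  (PySem.List.enumerate stations).foldl busStepA []

-- ===== PORT B =====
-- one station of B: arithmetic clamp, slice, extend
def busStepB (bus : List Int) (p : Int × List Int) : List Int :=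
  let off : Int := min (max (PySem.List.pyGetD p.2 1 0) 0) (bus.length : Int)
  let bus1 := PySem.List.slice bus none (some ((bus.length : Int) - off))
  let add : Int := min (max (PySem.List.pyGetD p.2 0 0) 0) (10 - (bus1.length : Int))
  bus1 ++ List.replicate add.toNat p.1

def bus_seating_alt (n : Int) (stations : List (List Int)) : List Int :=
  (PySem.List.enumerate stations 1).foldl busStepB []

-- ===== PRECONDITION & SPEC =====
-- Pre_ excludes exactly the inputs where Python A raises IndexError: a station list with fewer than 2 entries.
def Pre_bus_seating (n : Int) (stations : List (List Int)) : Prop :=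
  ∀ st ∈ stations, 2 ≤ st.length
instance (n : Int) (stations : List (List Int)) : Decidable (Pre_bus_seating n stations) := by
  unfold Pre_bus_seating; infer_instance

def pvWitness_bus_seating : Int × List (List Int) := (2, [[3, 0], [5, 2], [12, 4]])

def Spec_bus_seating (n : Int) (stations : List (List Int)) (out : List Int) : Prop := out = bus_seating_alt n stations
instance (n : Int) (stations : List (List Int)) (out : List Int) : Decidable (Spec_bus_seating n stations out) := by unfold Spec_bus_seating; infer_instance

-- ===== CLAIM (what is proved, stated in full; the proofs are below) =====
def Claim_equal_bus_seating : Prop := ∀ (n : Int) (stations : List (List Int)), Dom_bus_seating n stations → Pre_bus_seating n stations → Spec_bus_seating n stations (bus_seating n stations)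

-- ===== LEMMAS AND PROOFS =====

-- a foldl that ignores the list elements is an iterate
theorem foldl_const_iterate {α β : Type} (g : α → α) (l : List β) (init : α) :
    l.foldl (fun b _ => g b) init = g^[l.length] init := by
  induction l generalizing init with
  | nil => rfl
  | cons x xs ih => simp [List.foldl_cons, ih, Function.iterate_succ_apply]

-- popping j times from the back leaves the first (length - j) elements
theorem pop_iterate (bus : List Int) (j : Nat) :
    (fun b : List Int => if 0 < b.length then b.dropLast else b)^[j] bus
      = bus.take (bus.length - j) := by
  induction j generalizing bus with
  | zero => simp
  | succ j ih =>
    rw [Function.iterate_succ_apply]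
    rcases bus with _ | ⟨x, xs⟩
    · rw [ih]; simp
    · simp only [List.length_cons, if_pos (Nat.succ_pos _)]
      rw [ih, List.dropLast_eq_take, List.take_take, List.length_take]
      congr 1
      simp only [List.length_cons]
      omega

-- appending up to capacity 10, j times
theorem app_iterate (c : Int) (bus : List Int) (j : Nat) :
    (fun b : List Int => if b.length < 10 then b ++ [c] else b)^[j] bus
      = bus ++ List.replicate (min j (10 - bus.length)) c := by
  induction j generalizing bus with
  | zero => simp
  | succ j ih =>
    rw [Function.iterate_succ_apply]
    by_cases h : bus.length < 10
    · simp only [if_pos h]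
      rw [ih]
      rw [List.append_assoc, List.singleton_append]
      congr 1
      have h1 : 10 - bus.length = (10 - (bus ++ [c]).length) + 1 := by
        simp only [List.length_append, List.length_cons, List.length_nil]
        omega
      rw [h1, Nat.succ_min_succ, List.replicate_succ]
    · simp only [if_neg h]
      rw [ih]
      have h0 : 10 - bus.length = 0 := by omega
      simp [h0]

-- one station: A's two per-person loops equal B's clamped slice + extend
theorem step_eq (bus : List Int) (i : Int) (st : List Int) :
    busStepA bus (i, st) = busStepB bus (i + 1, st) := by
  unfold busStepA busStepB
  simp only []
  set s1 := PySem.List.pyGetD st 1 0 with hs1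
  set s0 := PySem.List.pyGetD st 0 0 with hs0
  have hslice : PySem.List.slice bus none
      (some ((bus.length : Int) - min (max s1 0) (bus.length : Int)))
      = bus.take ((bus.length : Int) - min (max s1 0) (bus.length : Int)).toNat :=
    PySem.List.slice_to bus (by omega)
  rw [hslice]
  rw [foldl_const_iterate, foldl_const_iterate,
      PySem.List.length_pyRange_one, PySem.List.length_pyRange_one,
      pop_iterate, app_iterate]
  have htake : (((bus.length : Int) - min (max s1 0) (bus.length : Int)).toNat)
      = bus.length - (s1 - 0).toNat := by omega
  rw [htake]
  congr 1
  have hlen : (bus.take (bus.length - (s1 - 0).toNat)).length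
      = bus.length - (s1 - 0).toNat := by
    rw [List.length_take]; omega
  rw [hlen]
  congr 1
  omega

-- the whole fold, generalizing the running enumerate index
theorem fold_eq (stations : List (List Int)) (s : Int) (bus : List Int) :
    (PySem.List.enumerate stations s).foldl busStepA bus
      = (PySem.List.enumerate stations (s + 1)).foldl busStepB bus := by
  induction stations generalizing s bus with
  | nil => simp [PySem.List.enumerate_nil]
  | cons st rest ih =>
    rw [PySem.List.enumerate_cons, PySem.List.enumerate_cons]
    simp only [List.foldl_cons]
    rw [step_eq, ih]

-- ===== VERDICT (by name: the statement is the Claim_ definition above) =====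
theorem bus_seating_spec : Claim_equal_bus_seating := by
  intro n stations _ _
  unfold Spec_bus_seating bus_seating bus_seating_alt
  have h := fold_eq stations 0 []
  simpa using h
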